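-- pv_equiv track=rewrite | github.com/cobaltt7/python-exercises | 8 list/101-104.py | one_zero_three
-- ===== SOURCE A (Python) =====
-- from typing import Any
--
-- def one_zero_three(data: list[Any], count: int):
--     """
--     Write a Python program to extract specified number of elements from a given list, which follows
--     each other continuously.
--     """
--     output = []
--     current = None
--     found = 0
--     for item in data:
--         if item == current:
--             found += 1
--         else:
--             current = item
--             found = 1
--         if found == count:
--             output.append(current)
--             found = 0
--     return output
-- ===== SOURCE B (Python) =====
-- from itertools import groupby
--
--
-- def one_zero_three(data, count):
--     # Partition data into maximal runs of equal consecutive elements;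
--     # a run of length L contributes L // count copies of its element.
--     if count <= 0:
--         return []
--     output = []
--     for key, group in groupby(data):
--         length = sum(1 for _ in group)
--         output.extend([key] * (length // count))
--     return output
-- ===== Notes on version B (the rewrite author's own statement) =====
-- stated objective: idiomatic
-- what changed: Replaces the hand-maintained current/found counter state machine by itertools.groupby: each maximal run of equal elements of length L contributes L // count copies of its key (count <= 0 yields nothing, as in A).
import Mathlib
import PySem

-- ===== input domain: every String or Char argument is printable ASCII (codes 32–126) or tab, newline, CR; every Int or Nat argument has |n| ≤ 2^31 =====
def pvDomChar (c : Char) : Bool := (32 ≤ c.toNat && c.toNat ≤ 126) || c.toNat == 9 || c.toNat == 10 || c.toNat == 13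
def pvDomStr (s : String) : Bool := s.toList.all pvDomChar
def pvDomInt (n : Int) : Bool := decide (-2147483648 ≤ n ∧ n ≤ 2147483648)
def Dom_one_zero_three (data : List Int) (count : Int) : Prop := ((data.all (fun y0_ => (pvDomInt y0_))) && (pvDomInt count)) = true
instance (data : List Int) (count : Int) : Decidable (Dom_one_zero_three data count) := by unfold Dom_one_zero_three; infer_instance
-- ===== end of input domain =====

-- B replaces A's current/found state machine by a run-length (groupby) decomposition: each
-- maximal run of length L contributes L // count copies of its key (idiomatic; same cost).


-- ===== PORT A =====
-- one loop step of A; state = (output, current, found).  At the append site Python's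
-- `current` is always `some` of the item just seen, so `.getD item`'s default is never used.
def stepA (count : Int) (st : List Int × Option Int × Int) (item : Int) :
    List Int × Option Int × Int :=
  let output := st.1
  let current := st.2.1
  let found := st.2.2
  let (current, found) := if some item = current then (current, found + 1) else (some item, 1)
  if found = count then (output ++ [current.getD item], current, 0)
  else (output, current, found)

def one_zero_three (data : List Int) (count : Int) : List Int :=
  (data.foldl (stepA count) ([], none, 0)).1

-- ===== PORT B =====
-- maximal runs of equal consecutive elements, with their lengths (= itertools.groupby)
def pyRuns (data : List Int) : List (Int × Nat) :=
  match data with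
  | [] => []
  | x :: xs =>
    let s := xs.span (fun y => y == x)
    (x, s.1.length + 1) :: pyRuns s.2
termination_by data.length
decreasing_by
  simp only [List.span_eq_takeWhile_dropWhile]
  exact Nat.lt_succ_of_le (List.length_dropWhile_le _ _)

def one_zero_three_alt (data : List Int) (count : Int) : List Int :=
  if count ≤ 0 then []
  else (pyRuns data).flatMap (fun p => List.replicate (p.2 / count.toNat) p.1)

-- ===== PRECONDITION & SPEC =====
def Spec_one_zero_three (data : List Int) (count : Int) (out : List Int) : Prop := out = one_zero_three_alt data count
instance (data : List Int) (count : Int) (out : List Int) : Decidable (Spec_one_zero_three data count out) := by unfold Spec_one_zero_three; infer_instance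

-- ===== CLAIM (what is proved, stated in full; the proofs are below) =====
def Claim_equal_one_zero_three : Prop := ∀ (data : List Int) (count : Int), Dom_one_zero_three data count → Spec_one_zero_three data count (one_zero_three data count)

-- ===== LEMMAS AND PROOFS =====

-- count ≤ 0: `found` is ≥ 1 right after each update, so `found = count` never fires.
lemma loopA_nonpos (count : Int) (hc : count ≤ 0) :
    ∀ (data out : List Int) (c : Option Int) (f : Int), 0 ≤ f →
      (data.foldl (stepA count) (out, c, f)).1 = out := by
  intro data
  induction data with
  | nil => intro out c f _; simp
  | cons x xs ih =>
    intro out c f hf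
    simp only [List.foldl_cons]
    by_cases h : some x = c
    · have h1 : ¬ (f + 1 = count) := by omega
      simpa [stepA, h, h1] using ih out c (f + 1) (by omega)
    · have h1 : ¬ ((1 : Int) = count) := by omega
      simpa [stepA, h, h1] using ih out (some x) 1 (by omega)

-- a whole run of `x`s, entered with current = some x and 0 ≤ f < count
lemma loopA_run (count : Int) (hc : 1 ≤ count) (x : Int) :
    ∀ (n : Nat) (out : List Int) (f : Int), 0 ≤ f → f < count →
      (List.replicate n x).foldl (stepA count) (out, some x, f) =
        (out ++ List.replicate ((f + n) / count).toNat x, some x, (f + n) % count) := by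
  intro n
  induction n with
  | zero =>
    intro out f h0 h1
    simp [Int.ediv_eq_zero_of_lt h0 h1, Int.emod_eq_of_lt h0 h1]
  | succ n ih =>
    intro out f h0 h1
    rw [List.replicate_succ, List.foldl_cons]
    by_cases hfc : f + 1 = count
    · have hstep : stepA count (out, some x, f) x = (out ++ [x], some x, 0) := by
        simp [stepA, hfc]
      rw [hstep, ih (out ++ [x]) 0 le_rfl (by omega)]
      have e1 : f + (n + 1 : Nat) = (0 + n) + 1 * count := by push_cast; omega
      have e2 : (f + (n + 1 : Nat)) / count = (0 + n) / count + 1 := by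
        rw [e1, Int.add_mul_ediv_right _ _ (by omega)]
      have e3 : (f + (n + 1 : Nat)) % count = (0 + n) % count := by
        rw [e1]; simpa using Int.add_mul_emod_self_right (0+(n:Int)) 1 count
      have hnn : 0 ≤ (0 + (n : Int)) / count := Int.ediv_nonneg (by omega) (by omega)
      rw [e2, e3]
      have : ((0 + (n : Int)) / count + 1).toNat = ((0 + (n : Int)) / count).toNat + 1 := by omega
      rw [this, List.replicate_succ, List.append_assoc]
      rfl
    · have hstep : stepA count (out, some x, f) x = (out, some x, f + 1) := by
        simp [stepA, hfc]
      rw [hstep, ih out (f + 1) (by omega) (by omega)]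
      have : f + 1 + (n : Int) = f + ((n : Nat) + 1 : Nat) := by push_cast; ring
      rw [this]
  
-- head of dropWhile fails the predicate
lemma head?_dropWhile_false {α : Type} (p : α → Bool) :
    ∀ (l : List α) (y : α), (l.dropWhile p).head? = some y → p y = false := by
  intro l
  induction l with
  | nil => intro y h; simp at h
  | cons a l ih =>
    intro y h
    by_cases hp : p a
    · rw [List.dropWhile_cons_of_pos hp] at h; exact ih y h
    · rw [List.dropWhile_cons_of_neg hp] at h
      rw [List.head?_cons] at h
      injection h with h
      subst h
      simpa using hp

-- takeWhile (· == x) is a replicate of x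
lemma takeWhile_beq_replicate (x : Int) (xs : List Int) :
    xs.takeWhile (fun y => y == x) = List.replicate (xs.takeWhile (fun y => y == x)).length x := by
  rw [List.eq_replicate_iff]
  refine ⟨rfl, ?_⟩
  intro b hb
  have := List.mem_takeWhile_imp hb
  simpa using this

-- main loop lemma for count ≥ 1: A's fold, run by run
lemma loopA_main (count : Int) (hc : 1 ≤ count) :
    ∀ (data : List Int), ∀ (out : List Int) (c : Option Int) (f : Int),
      (∀ y, data.head? = some y → c ≠ some y) →
      (data.foldl (stepA count) (out, c, f)).1 =
        out ++ (pyRuns data).flatMap (fun p => List.replicate (p.2 / count.toNat) p.1) := by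
  intro data
  induction data using pyRuns.induct with
  | case1 => intro out c f _; simp [pyRuns]
  | case2 x xs s ih =>
    intro out c f hhead
    have hs : s = (xs.takeWhile (fun y => y == x), xs.dropWhile (fun y => y == x)) := by
      show List.span (fun y => y == x) xs = _
      exact List.span_eq_takeWhile_dropWhile ..
    rw [hs] at ih
    have hcx : c ≠ some x := hhead x rfl
    rw [List.foldl_cons]
    have hstep : stepA count (out, c, f) x =
        (out ++ List.replicate ((1 / count).toNat) x, some x, 1 % count) := by
      by_cases h1 : (1 : Int) = count
      · simp [stepA, Ne.symm hcx, ← h1]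
      · have e1 : (1 : Int) / count = 0 := Int.ediv_eq_zero_of_lt (by omega) (by omega)
        have e2 : (1 : Int) % count = 1 := Int.emod_eq_of_lt (by omega) (by omega)
        simp [stepA, Ne.symm hcx, h1, e1, e2]
    rw [hstep]
    have hsplit : xs = xs.takeWhile (fun y => y == x) ++ xs.dropWhile (fun y => y == x) :=
      (List.takeWhile_append_dropWhile).symm
    have hrep : xs.takeWhile (fun y => y == x)
        = List.replicate (xs.takeWhile (fun y => y == x)).length x := takeWhile_beq_replicate x xs
    conv_lhs => rw [hsplit]
    rw [List.foldl_append]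
    conv_lhs => rw [hrep]
    rw [loopA_run count hc x _ _ (1 % count)
        (Int.emod_nonneg 1 (by omega)) (Int.emod_lt_of_pos 1 (by omega))]
    have ihead : ∀ y, (xs.dropWhile (fun y => y == x)).head? = some y →
        (some x : Option Int) ≠ some y := by
      intro y hy
      have hpf : (fun y => y == x) y = false := head?_dropWhile_false _ xs y hy
      simp only [beq_eq_false_iff_ne, ne_eq] at hpf
      simp [Ne.symm hpf]
    rw [ih _ _ _ ihead]
    set L := (xs.takeWhile (fun y => y == x)).length with hLdef
    have key : (1 / count).toNat + ((1 % count + L) / count).toNat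
        = (L + 1) / count.toNat := by
      have e4 : ((count.toNat : Nat) : Int) = count := by omega
      have hdm : count * (1 / count) + 1 % count = 1 := Int.ediv_add_emod 1 count
      have e0 : ((L : Int) + 1) = (1 % count + L) + count * (1 / count) := by omega
      have e2 : ((L : Int) + 1) / ((count.toNat : Nat) : Int)
          = (1 % count + L) / count + 1 / count := by
        conv_lhs => rw [e4]
        rw [e0, mul_comm count (1 / count), Int.add_mul_ediv_right _ _ (by omega)]
      have e3 : ((L : Int) + 1) / ((count.toNat : Nat) : Int)
          = ((L + 1) / count.toNat : Nat) := by
        have h := (Int.natCast_ediv (L + 1) count.toNat).symm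
        simpa using h
      have h1n : 0 ≤ (1 : Int) / count := Int.ediv_nonneg (by omega) (by omega)
      have h2n : 0 ≤ ((1 % count + L) / count) :=
        Int.ediv_nonneg (by have := Int.emod_nonneg 1 (show count ≠ 0 by omega); omega) (by omega)
      omega
    rw [pyRuns]
    simp only [List.span_eq_takeWhile_dropWhile, List.flatMap_cons, ← hLdef]
    rw [← key, List.replicate_add]
    simp [List.append_assoc]

-- ===== VERDICT (by name: the statement is the Claim_ definition above) =====
theorem one_zero_three_spec : Claim_equal_one_zero_three := by
  intro data count _
  unfold Spec_one_zero_three one_zero_three one_zero_three_alt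
  by_cases hc : count ≤ 0
  · rw [if_pos hc]
    exact loopA_nonpos count hc data [] none 0 le_rfl
  · rw [if_neg hc]
    have := loopA_main count (by omega) data [] none 0 (by intro y _; simp)
    simpa using this
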